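-- pv_equiv track=rewrite | github.com/syrr3011/Hybrid-Solar-Panel-Cleaning-Robot | Control_team/1129.py | tail_ones
-- ===== SOURCE A (Python) =====
-- def tail_ones(seq):
--     count = 0
--     for v in reversed(seq):
--         if v == 1:
--             count += 1
--         else:
--             break
--     return count
-- ===== SOURCE B (Python) =====
-- def tail_ones(seq):
--     count = 0
--     for i in range(len(seq)):
--         if seq[i] == 1:
--             count += 1
--         else:
--             count = 0
--     return count
-- ===== Notes on version B (the rewrite author's own statement) =====
-- stated objective: alternative
-- what changed: Forward index scan with a counter that resets to 0 on non-1 values, instead of a reverse iteration with an early break; only the trailing run of 1s survives the resets.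
import Mathlib
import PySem

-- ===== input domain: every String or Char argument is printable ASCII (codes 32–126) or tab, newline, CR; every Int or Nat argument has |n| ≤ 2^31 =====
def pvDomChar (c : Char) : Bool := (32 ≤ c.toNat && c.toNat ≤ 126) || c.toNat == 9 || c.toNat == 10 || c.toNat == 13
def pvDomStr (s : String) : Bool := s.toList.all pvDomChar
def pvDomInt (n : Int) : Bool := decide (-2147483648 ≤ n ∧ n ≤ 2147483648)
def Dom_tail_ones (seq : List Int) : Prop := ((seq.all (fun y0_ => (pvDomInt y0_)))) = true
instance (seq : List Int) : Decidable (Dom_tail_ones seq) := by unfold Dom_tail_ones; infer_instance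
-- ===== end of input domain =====

-- ===== PORT A =====
-- Header: B scans forward with a reset-to-0 counter instead of A's reverse scan with break; equal return values (alternative decomposition).
def tailOnesLoopA (count : Int) : List Int → Int
  | [] => count
  | v :: rest => if v = 1 then tailOnesLoopA (count + 1) rest else count

def tail_ones (seq : List Int) : Int := tailOnesLoopA 0 seq.reverse

-- ===== PORT B =====
def tail_ones_alt (seq : List Int) : Int :=
  seq.foldl (fun c v => if v = 1 then c + 1 else 0) 0

-- ===== PRECONDITION & SPEC =====
def Spec_tail_ones (seq : List Int) (out : Int) : Prop := out = tail_ones_alt seq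
instance (seq : List Int) (out : Int) : Decidable (Spec_tail_ones seq out) := by unfold Spec_tail_ones; infer_instance

-- ===== CLAIM (what is proved, stated in full; the proofs are below) =====
def Claim_equal_tail_ones : Prop := ∀ (seq : List Int), Dom_tail_ones seq → Spec_tail_ones seq (tail_ones seq)

-- ===== LEMMAS AND PROOFS =====
theorem tailOnesLoopA_shift (c : Int) (l : List Int) :
    tailOnesLoopA c l = c + tailOnesLoopA 0 l := by
  induction l generalizing c with
  | nil => simp [tailOnesLoopA]
  | cons v rest ih =>
    by_cases h : v = 1 <;> simp [tailOnesLoopA, h]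
    rw [ih (c + 1), ih 1]; ring

theorem tail_ones_eq (seq : List Int) : tail_ones seq = tail_ones_alt seq := by
  induction seq using List.reverseRecOn with
  | nil => simp [tail_ones, tail_ones_alt, tailOnesLoopA]
  | append_singleton l v ih =>
    simp only [tail_ones, tail_ones_alt, List.reverse_append, List.reverse_cons,
      List.reverse_nil, List.nil_append, List.cons_append, List.foldl_append,
      List.foldl_cons, List.foldl_nil] at *
    by_cases h : v = 1 <;> simp [tailOnesLoopA, h]
    · rw [tailOnesLoopA_shift, ih]; ring

-- ===== VERDICT (by name: the statement is the Claim_ definition above) =====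
theorem tail_ones_spec : Claim_equal_tail_ones := by
  intro seq _; exact tail_ones_eq seq
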